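-- pv_equiv track=rewrite | github.com/soyjubilado/AdventOfCode | 2022/prog202222.py | NextSpot
-- ===== SOURCE A (Python) =====
-- def AddCoords(coord1, coord2):
--   """Add two coordinates like vectors."""
--   x1, y1 = coord1
--   x2, y2 = coord2
--   return (x1 + x2, y1 + y2)
--
-- def NextSpot(start, facing, grid, max_coord):
--   """Find the next spot, given the current spot and a direction. The next
--      spot may be wrapped around."""
--   x, y = start
--   max_x, max_y = max_coord
--   additive = {'N': (0, -1),
--               'E': (1, 0),
--               'S': (0, 1),
--               'W': (-1, 0)}
--   spot = AddCoords(start, additive[facing])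
--   # Wraparound
--   if spot not in grid:
--     new_start_from_facing = {'N': (x, max_y),
--                              'E': (0, y),
--                              'S': (x, 0),
--                              'W': (max_x, y),}
--     spot = new_start_from_facing[facing]
--     while spot not in grid:
--       spot = AddCoords(spot, additive[facing])
--   return spot, facing
-- ===== SOURCE B (Python) =====
-- def NextSpot(start, facing, grid, max_coord):
--   """Find the next spot, given the current spot and a direction. The next
--      spot may be wrapped around."""
--   x, y = start
--   max_x, max_y = max_coord
--   dx, dy = {'N': (0, -1), 'E': (1, 0), 'S': (0, 1), 'W': (-1, 0)}[facing]
--   spot = (x + dx, y + dy)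
--   if spot in grid:
--     return spot, facing
--   # Wraparound: jump straight to the far extreme of the occupied line.
--   if facing == 'E':
--     return (min(gx for gx, gy in grid if gy == y), y), facing
--   if facing == 'W':
--     return (max(gx for gx, gy in grid if gy == y), y), facing
--   if facing == 'S':
--     return (x, min(gy for gx, gy in grid if gx == x)), facing
--   return (x, max(gy for gx, gy in grid if gx == x)), facing
-- ===== Notes on version B (the rewrite author's own statement) =====
-- stated objective: alternative
-- what changed: The incremental edge-walk on wraparound (start at the far edge and step cell by cell until a grid cell is hit) is replaced by a direct extremum over the occupied line: filter the grid for the current row/column and take min/max of the relevant coordinate.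
-- outside the precondition, e.g. on NextSpot((2, 0), 'E', {(-5, 0), (0, 0)}, (9, 9)): A returns ((0, 0), 'E'), B returns ((-5, 0), 'E'); on NextSpot((0, 0), 'E', {(1, 2, 3), (5, 0)}, (9, 9)): A returns ((5, 0), 'E'), B raises ValueError
import Mathlib
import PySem

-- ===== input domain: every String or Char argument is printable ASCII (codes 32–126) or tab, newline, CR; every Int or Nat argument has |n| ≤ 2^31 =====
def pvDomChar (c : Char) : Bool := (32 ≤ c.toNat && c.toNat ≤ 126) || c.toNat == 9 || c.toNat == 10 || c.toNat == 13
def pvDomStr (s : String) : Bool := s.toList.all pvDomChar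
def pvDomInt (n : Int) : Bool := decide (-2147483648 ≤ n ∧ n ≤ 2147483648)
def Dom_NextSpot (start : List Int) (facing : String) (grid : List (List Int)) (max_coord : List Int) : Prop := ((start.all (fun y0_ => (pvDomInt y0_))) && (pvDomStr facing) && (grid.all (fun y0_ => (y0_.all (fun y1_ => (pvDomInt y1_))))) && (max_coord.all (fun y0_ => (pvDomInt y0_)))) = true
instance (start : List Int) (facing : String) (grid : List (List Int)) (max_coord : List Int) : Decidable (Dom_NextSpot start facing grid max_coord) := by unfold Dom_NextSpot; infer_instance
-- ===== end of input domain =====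

-- B replaces A's incremental wraparound edge-walk by a direct min/max over the occupied row/column (objective: alternative algorithm).

-- ===== PORT A =====
-- AddCoords
def pvAdd (a b : Int × Int) : Int × Int := (a.1 + b.1, a.2 + b.2)

-- the dict literal additive[facing]; none = KeyError (excluded by Pre_)
def pvAdditive (f : String) : Option (Int × Int) :=
  if f = "N" then some (0, -1)
  else if f = "E" then some (1, 0)
  else if f = "S" then some (0, 1)
  else if f = "W" then some (-1, 0)
  else none

-- the 'while spot not in grid' loop; fuel only makes it total (Pre_ guarantees enough fuel)
def pvWalkA (grid : List (List Int)) (d : Int × Int) : Nat → Int × Int → Int × Int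
  | 0, spot => spot
  | fuel + 1, spot => if [spot.1, spot.2] ∈ grid then spot else pvWalkA grid d fuel (pvAdd spot d)

def pvFuel (grid : List (List Int)) (mx my : Int) : Nat :=
  (grid.map (fun g => (g.map Int.natAbs).sum)).sum + mx.natAbs + my.natAbs + 1

def NextSpot (start : List Int) (facing : String) (grid : List (List Int)) (max_coord : List Int) : List Int × String :=
  match start, max_coord with
  | [x, y], [mx, my] =>
    match pvAdditive facing with
    | none => ([], facing)  -- KeyError in Python; excluded by Pre_
    | some d =>
      let spot := pvAdd (x, y) d
      if [spot.1, spot.2] ∈ grid then ([spot.1, spot.2], facing)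
      else
        let s0 : Int × Int :=
          if facing = "N" then (x, my)
          else if facing = "E" then (0, y)
          else if facing = "S" then (x, 0)
          else (mx, y)
        let r := pvWalkA grid d (pvFuel grid mx my) s0
        ([r.1, r.2], facing)
  | _, _ => ([], facing)  -- tuple-unpacking ValueError in Python; excluded by Pre_

-- ===== PORT B =====
-- B's own copies of AddCoords and the additive dict (ports may not share helpers)
def pvAddB (a b : Int × Int) : Int × Int := (a.1 + b.1, a.2 + b.2)

def pvAdditiveB (f : String) : Option (Int × Int) :=
  if f = "N" then some (0, -1)
  else if f = "E" then some (1, 0)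
  else if f = "S" then some (0, 1)
  else if f = "W" then some (-1, 0)
  else none

-- [gx for gx, gy in grid if gy == y]  (exact on Pre_, where every grid cell is a pair)
def pvLineXs (grid : List (List Int)) (y : Int) : List Int :=
  grid.filterMap (fun g =>
    match g with
    | gx :: t =>
      match t with
      | gy :: t2 =>
        match t2 with
        | [] => if gy = y then some gx else none
        | _ :: _ => none
      | [] => none
    | [] => none)

-- [gy for gx, gy in grid if gx == x]
def pvLineYs (grid : List (List Int)) (x : Int) : List Int :=
  grid.filterMap (fun g =>
    match g with
    | gx :: t =>
      match t with
      | gy :: t2 =>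
        match t2 with
        | [] => if gx = x then some gy else none
        | _ :: _ => none
      | [] => none
    | [] => none)

def NextSpot_alt (start : List Int) (facing : String) (grid : List (List Int)) (max_coord : List Int) : List Int × String :=
  match start with
  | x :: stail =>
    match stail with
    | y :: stail2 =>
      match stail2 with
      | _ :: _ => ([], facing)  -- ValueError; excluded by Pre_
      | [] =>
       match max_coord with
       | _mx :: mtail =>
        match mtail with
        | _my :: mtail2 =>
         match mtail2 with
         | _ :: _ => ([], facing)  -- ValueError; excluded by Pre_
         | [] =>
          match pvAdditiveB facing with
          | some d =>
            let spot := pvAddB (x, y) d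
            if [spot.1, spot.2] ∈ grid then ([spot.1, spot.2], facing)
            else if facing = "E" then
              match PySem.List.min? (pvLineXs grid y) (fun v => v) with
              | some m => ([m, y], facing)
              | none => ([], facing)  -- ValueError on empty min; excluded by Pre_
            else if facing = "W" then
              match PySem.List.max? (pvLineXs grid y) (fun v => v) with
              | some m => ([m, y], facing)
              | none => ([], facing)
            else if facing = "S" then
              match PySem.List.min? (pvLineYs grid x) (fun v => v) with
              | some m => ([x, m], facing)
              | none => ([], facing)
            else
              match PySem.List.max? (pvLineYs grid x) (fun v => v) with
              | some m => ([x, m], facing)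
              | none => ([], facing)
          | none => ([], facing)  -- KeyError; excluded by Pre_
        | [] => ([], facing)  -- ValueError; excluded by Pre_
       | [] => ([], facing)  -- ValueError; excluded by Pre_
    | [] => ([], facing)  -- ValueError; excluded by Pre_
  | [] => ([], facing)  -- ValueError; excluded by Pre_

-- ===== PRECONDITION & SPEC =====
-- Pre_ excludes inputs where A raises (start/max_coord not pairs, facing not one of NESW) or scans
-- forever (no reachable cell on the scanned line), and wraparound inputs whose grid has non-pair
-- cells or line cells outside the [0, max_coord] band: there A's edge-walk silently skips them
-- while B's line-extremum counts them — both defensible readings of a grid/max_coord contract violation.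
def Pre_NextSpot (start : List Int) (facing : String) (grid : List (List Int)) (max_coord : List Int) : Prop :=
  start.length = 2 ∧ max_coord.length = 2 ∧
  (let x := start.getD 0 0
   let y := start.getD 1 0
   let mx := max_coord.getD 0 0
   let my := max_coord.getD 1 0
   (facing = "E" ∧ ([x + 1, y] ∈ grid ∨ ((∀ g ∈ grid, g.length = 2) ∧ (∃ g ∈ grid, g.length = 2 ∧ g.getD 1 0 = y) ∧ ∀ g ∈ grid, g.length = 2 → g.getD 1 0 = y → 0 ≤ g.getD 0 0)))
   ∨ (facing = "W" ∧ ([x - 1, y] ∈ grid ∨ ((∀ g ∈ grid, g.length = 2) ∧ (∃ g ∈ grid, g.length = 2 ∧ g.getD 1 0 = y) ∧ ∀ g ∈ grid, g.length = 2 → g.getD 1 0 = y → g.getD 0 0 ≤ mx)))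
   ∨ (facing = "S" ∧ ([x, y + 1] ∈ grid ∨ ((∀ g ∈ grid, g.length = 2) ∧ (∃ g ∈ grid, g.length = 2 ∧ g.getD 0 0 = x) ∧ ∀ g ∈ grid, g.length = 2 → g.getD 0 0 = x → 0 ≤ g.getD 1 0)))
   ∨ (facing = "N" ∧ ([x, y - 1] ∈ grid ∨ ((∀ g ∈ grid, g.length = 2) ∧ (∃ g ∈ grid, g.length = 2 ∧ g.getD 0 0 = x) ∧ ∀ g ∈ grid, g.length = 2 → g.getD 0 0 = x → g.getD 1 0 ≤ my))))

instance (start : List Int) (facing : String) (grid : List (List Int)) (max_coord : List Int) : Decidable (Pre_NextSpot start facing grid max_coord) := by unfold Pre_NextSpot; infer_instance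

def pvWitness_NextSpot : List Int × String × List (List Int) × List Int := ([2, 0], "E", [[0, 0], [2, 0]], [2, 1])

def Spec_NextSpot (start : List Int) (facing : String) (grid : List (List Int)) (max_coord : List Int) (out : List Int × String) : Prop := out = NextSpot_alt start facing grid max_coord
instance (start : List Int) (facing : String) (grid : List (List Int)) (max_coord : List Int) (out : List Int × String) : Decidable (Spec_NextSpot start facing grid max_coord out) := by unfold Spec_NextSpot; infer_instance

-- ===== CLAIM (what is proved, stated in full; the proofs are below) =====
def Claim_equal_NextSpot : Prop := ∀ (start : List Int) (facing : String) (grid : List (List Int)) (max_coord : List Int), Dom_NextSpot start facing grid max_coord → Pre_NextSpot start facing grid max_coord → Spec_NextSpot start facing grid max_coord (NextSpot start facing grid max_coord)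

-- ===== LEMMAS AND PROOFS =====

theorem pv_mem_lineXs {grid : List (List Int)} {a y : Int} :
    a ∈ pvLineXs grid y ↔ [a, y] ∈ grid := by
  constructor
  · intro h
    rcases List.mem_filterMap.mp h with ⟨g, hg, hf⟩
    rcases g with _ | ⟨gx, g⟩
    · simp at hf
    rcases g with _ | ⟨gy, g⟩
    · simp at hf
    rcases g with _ | ⟨gz, g⟩
    · simp only [] at hf
      split at hf
      · rename_i hy
        cases hf
        subst hy
        exact hg
      · cases hf
    · simp at hf
  · intro h
    exact List.mem_filterMap.mpr ⟨[a, y], h, by simp⟩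

theorem pv_mem_lineYs {grid : List (List Int)} {b x : Int} :
    b ∈ pvLineYs grid x ↔ [x, b] ∈ grid := by
  constructor
  · intro h
    rcases List.mem_filterMap.mp h with ⟨g, hg, hf⟩
    rcases g with _ | ⟨gx, g⟩
    · simp at hf
    rcases g with _ | ⟨gy, g⟩
    · simp at hf
    rcases g with _ | ⟨gz, g⟩
    · simp only [] at hf
      split at hf
      · rename_i hy
        cases hf
        subst hy
        exact hg
      · cases hf
    · simp at hf
  · intro h
    exact List.mem_filterMap.mpr ⟨[x, b], h, by simp⟩

theorem pv_mem_le_sum {grid : List (List Int)} {a b : Int} (h : [a, b] ∈ grid) :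
    a.natAbs + b.natAbs ≤ (grid.map (fun g => (g.map Int.natAbs).sum)).sum := by
  induction grid with
  | nil => simp at h
  | cons g t ih =>
    rcases List.mem_cons.mp h with h | h
    · subst h; simp
    · have := ih h; simp; omega

theorem pv_walk_right {grid : List (List Int)} {m y : Int}
    (hm : [m, y] ∈ grid) (hmin : ∀ a : Int, [a, y] ∈ grid → m ≤ a) :
    ∀ (fuel : Nat) (s : Int), s ≤ m → (m - s).toNat < fuel →
      pvWalkA grid (1, 0) fuel (s, y) = (m, y) := by
  intro fuel
  induction fuel with
  | zero => intro s hs hf; omega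
  | succ f ih =>
    intro s hs hf
    by_cases hin : [s, y] ∈ grid
    · have hsm : s = m := le_antisymm hs (hmin s hin)
      subst hsm
      simp only [pvWalkA]
      rw [if_pos hin]
    · have hne : s ≠ m := fun h => hin (h ▸ hm)
      simp only [pvWalkA]
      rw [if_neg hin]
      simp only [pvAdd]
      have : pvWalkA grid (1, 0) f (s + 1, y) = (m, y) := ih (s + 1) (by omega) (by omega)
      simpa using this

theorem pv_walk_left {grid : List (List Int)} {m y : Int}
    (hm : [m, y] ∈ grid) (hmax : ∀ a : Int, [a, y] ∈ grid → a ≤ m) :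
    ∀ (fuel : Nat) (s : Int), m ≤ s → (s - m).toNat < fuel →
      pvWalkA grid (-1, 0) fuel (s, y) = (m, y) := by
  intro fuel
  induction fuel with
  | zero => intro s hs hf; omega
  | succ f ih =>
    intro s hs hf
    by_cases hin : [s, y] ∈ grid
    · have hsm : s = m := le_antisymm (hmax s hin) hs
      subst hsm
      simp only [pvWalkA]
      rw [if_pos hin]
    · have hne : s ≠ m := fun h => hin (h ▸ hm)
      simp only [pvWalkA]
      rw [if_neg hin]
      simp only [pvAdd]
      have : pvWalkA grid (-1, 0) f (s - 1, y) = (m, y) := ih (s - 1) (by omega) (by omega)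
      simpa [sub_eq_add_neg] using this

theorem pv_walk_down {grid : List (List Int)} {m x : Int}
    (hm : [x, m] ∈ grid) (hmin : ∀ b : Int, [x, b] ∈ grid → m ≤ b) :
    ∀ (fuel : Nat) (s : Int), s ≤ m → (m - s).toNat < fuel →
      pvWalkA grid (0, 1) fuel (x, s) = (x, m) := by
  intro fuel
  induction fuel with
  | zero => intro s hs hf; omega
  | succ f ih =>
    intro s hs hf
    by_cases hin : [x, s] ∈ grid
    · have hsm : s = m := le_antisymm hs (hmin s hin)
      subst hsm
      simp only [pvWalkA]
      rw [if_pos hin]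
    · have hne : s ≠ m := fun h => hin (h ▸ hm)
      simp only [pvWalkA]
      rw [if_neg hin]
      simp only [pvAdd]
      have : pvWalkA grid (0, 1) f (x, s + 1) = (x, m) := ih (s + 1) (by omega) (by omega)
      simpa using this

theorem pv_walk_up {grid : List (List Int)} {m x : Int}
    (hm : [x, m] ∈ grid) (hmax : ∀ b : Int, [x, b] ∈ grid → b ≤ m) :
    ∀ (fuel : Nat) (s : Int), m ≤ s → (s - m).toNat < fuel →
      pvWalkA grid (0, -1) fuel (x, s) = (x, m) := by
  intro fuel
  induction fuel with
  | zero => intro s hs hf; omega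
  | succ f ih =>
    intro s hs hf
    by_cases hin : [x, s] ∈ grid
    · have hsm : s = m := le_antisymm (hmax s hin) hs
      subst hsm
      simp only [pvWalkA]
      rw [if_pos hin]
    · have hne : s ≠ m := fun h => hin (h ▸ hm)
      simp only [pvWalkA]
      rw [if_neg hin]
      simp only [pvAdd]
      have : pvWalkA grid (0, -1) f (x, s - 1) = (x, m) := ih (s - 1) (by omega) (by omega)
      simpa [sub_eq_add_neg] using this

-- ===== VERDICT (by name: the statement is the Claim_ definition above) =====

theorem NextSpot_spec : Claim_equal_NextSpot := by
  intro start facing grid max_coord hD hPre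
  unfold Spec_NextSpot
  obtain ⟨h1, h2, hrest⟩ := hPre
  rcases List.length_eq_two.mp h1 with ⟨x, y, rfl⟩
  rcases List.length_eq_two.mp h2 with ⟨mx, my, rfl⟩
  simp only [List.getD_cons_zero, List.getD_cons_succ] at hrest
  rcases hrest with ⟨hf, hcase⟩ | ⟨hf, hcase⟩ | ⟨hf, hcase⟩ | ⟨hf, hcase⟩
  · -- facing = "E"
    subst hf
    by_cases hin : [x + 1, y] ∈ grid
    · simp [NextSpot, NextSpot_alt, pvAdditive, pvAdd, pvAdditiveB, pvAddB, hin]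
    · obtain ⟨hp, ⟨g0, hg0, hg0len, hg0c⟩, hall0⟩ := hcase.resolve_left hin
      rcases List.length_eq_two.mp hg0len with ⟨a0, b0, rfl⟩
      simp only [List.getD_cons_zero, List.getD_cons_succ] at hg0c
      have hg1 : [a0, y] ∈ grid := by rwa [hg0c] at hg0
      have hne : pvLineXs grid y ≠ [] := List.ne_nil_of_mem (pv_mem_lineXs.mpr hg1)
      have hall : ∀ v ∈ pvLineXs grid y, 0 ≤ v := fun v hv => by
        have := hall0 [v, y] (pv_mem_lineXs.mp hv) (by simp) (by simp)
        simpa using this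
      rcases hq : PySem.List.min? (pvLineXs grid y) (fun v => v) with _ | m
      · exact absurd ((PySem.List.min?_eq_none_iff _ _).mp hq) hne
      have hmmem : [m, y] ∈ grid := pv_mem_lineXs.mp (PySem.List.min?_mem hq)
      have hmin' : ∀ a : Int, [a, y] ∈ grid → m ≤ a :=
        fun a ha => PySem.List.min?_isMin hq a (pv_mem_lineXs.mpr ha)
      have h0m : (0 : Int) ≤ m := hall m (PySem.List.min?_mem hq)
      have hfuel : (m - 0).toNat < pvFuel grid mx my := by
        have := pv_mem_le_sum hmmem; unfold pvFuel; omega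
      have hw := pv_walk_right hmmem hmin' (pvFuel grid mx my) 0 h0m hfuel
      simp [NextSpot, NextSpot_alt, pvAdditive, pvAdd, pvAdditiveB, pvAddB, hin, hq, hw]
  · -- facing = "W"
    subst hf
    by_cases hin : [x + -1, y] ∈ grid
    · simp [NextSpot, NextSpot_alt, pvAdditive, pvAdd, pvAdditiveB, pvAddB, hin]
    · have hin' : ¬ [x - 1, y] ∈ grid := by rwa [sub_eq_add_neg]
      obtain ⟨hp, ⟨g0, hg0, hg0len, hg0c⟩, hall0⟩ := hcase.resolve_left hin'
      rcases List.length_eq_two.mp hg0len with ⟨a0, b0, rfl⟩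
      simp only [List.getD_cons_zero, List.getD_cons_succ] at hg0c
      have hg1 : [a0, y] ∈ grid := by rwa [hg0c] at hg0
      have hne : pvLineXs grid y ≠ [] := List.ne_nil_of_mem (pv_mem_lineXs.mpr hg1)
      have hall : ∀ v ∈ pvLineXs grid y, v ≤ mx := fun v hv => by
        have := hall0 [v, y] (pv_mem_lineXs.mp hv) (by simp) (by simp)
        simpa using this
      rcases hq : PySem.List.max? (pvLineXs grid y) (fun v => v) with _ | m
      · exact absurd ((PySem.List.max?_eq_none_iff _ _).mp hq) hne
      have hmmem : [m, y] ∈ grid := pv_mem_lineXs.mp (PySem.List.max?_mem hq)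
      have hmax' : ∀ a : Int, [a, y] ∈ grid → a ≤ m :=
        fun a ha => PySem.List.max?_isMax hq a (pv_mem_lineXs.mpr ha)
      have hmmx : m ≤ mx := hall m (PySem.List.max?_mem hq)
      have hfuel : (mx - m).toNat < pvFuel grid mx my := by
        have := pv_mem_le_sum hmmem; unfold pvFuel; omega
      have hw := pv_walk_left hmmem hmax' (pvFuel grid mx my) mx hmmx hfuel
      simp [NextSpot, NextSpot_alt, pvAdditive, pvAdd, pvAdditiveB, pvAddB, hin, hq, hw]
  · -- facing = "S"
    subst hf
    by_cases hin : [x, y + 1] ∈ grid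
    · simp [NextSpot, NextSpot_alt, pvAdditive, pvAdd, pvAdditiveB, pvAddB, hin]
    · obtain ⟨hp, ⟨g0, hg0, hg0len, hg0c⟩, hall0⟩ := hcase.resolve_left hin
      rcases List.length_eq_two.mp hg0len with ⟨a0, b0, rfl⟩
      simp only [List.getD_cons_zero] at hg0c
      have hg1 : [x, b0] ∈ grid := by rwa [hg0c] at hg0
      have hne : pvLineYs grid x ≠ [] := List.ne_nil_of_mem (pv_mem_lineYs.mpr hg1)
      have hall : ∀ v ∈ pvLineYs grid x, 0 ≤ v := fun v hv => by
        have := hall0 [x, v] (pv_mem_lineYs.mp hv) (by simp) (by simp)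
        simpa using this
      rcases hq : PySem.List.min? (pvLineYs grid x) (fun v => v) with _ | m
      · exact absurd ((PySem.List.min?_eq_none_iff _ _).mp hq) hne
      have hmmem : [x, m] ∈ grid := pv_mem_lineYs.mp (PySem.List.min?_mem hq)
      have hmin' : ∀ b : Int, [x, b] ∈ grid → m ≤ b :=
        fun b hb => PySem.List.min?_isMin hq b (pv_mem_lineYs.mpr hb)
      have h0m : (0 : Int) ≤ m := hall m (PySem.List.min?_mem hq)
      have hfuel : (m - 0).toNat < pvFuel grid mx my := by
        have := pv_mem_le_sum hmmem; unfold pvFuel; omega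
      have hw := pv_walk_down hmmem hmin' (pvFuel grid mx my) 0 h0m hfuel
      simp [NextSpot, NextSpot_alt, pvAdditive, pvAdd, pvAdditiveB, pvAddB, hin, hq, hw]
  · -- facing = "N"
    subst hf
    by_cases hin : [x, y + -1] ∈ grid
    · simp [NextSpot, NextSpot_alt, pvAdditive, pvAdd, pvAdditiveB, pvAddB, hin]
    · have hin' : ¬ [x, y - 1] ∈ grid := by rwa [sub_eq_add_neg]
      obtain ⟨hp, ⟨g0, hg0, hg0len, hg0c⟩, hall0⟩ := hcase.resolve_left hin'
      rcases List.length_eq_two.mp hg0len with ⟨a0, b0, rfl⟩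
      simp only [List.getD_cons_zero] at hg0c
      have hg1 : [x, b0] ∈ grid := by rwa [hg0c] at hg0
      have hne : pvLineYs grid x ≠ [] := List.ne_nil_of_mem (pv_mem_lineYs.mpr hg1)
      have hall : ∀ v ∈ pvLineYs grid x, v ≤ my := fun v hv => by
        have := hall0 [x, v] (pv_mem_lineYs.mp hv) (by simp) (by simp)
        simpa using this
      rcases hq : PySem.List.max? (pvLineYs grid x) (fun v => v) with _ | m
      · exact absurd ((PySem.List.max?_eq_none_iff _ _).mp hq) hne
      have hmmem : [x, m] ∈ grid := pv_mem_lineYs.mp (PySem.List.max?_mem hq)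
      have hmax' : ∀ b : Int, [x, b] ∈ grid → b ≤ m :=
        fun b hb => PySem.List.max?_isMax hq b (pv_mem_lineYs.mpr hb)
      have hmmy : m ≤ my := hall m (PySem.List.max?_mem hq)
      have hfuel : (my - m).toNat < pvFuel grid mx my := by
        have := pv_mem_le_sum hmmem; unfold pvFuel; omega
      have hw := pv_walk_up hmmem hmax' (pvFuel grid mx my) my hmmy hfuel
      simp [NextSpot, NextSpot_alt, pvAdditive, pvAdd, pvAdditiveB, pvAddB, hin, hq, hw]
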